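-- pv_equiv track=rewrite | github.com/miguepersa/parciales_lenguajes | Parcial_2/Enunciado_3/Iterador.py | sublistas_crecientes
-- ===== SOURCE A (Python) =====
-- def sublistas_crecientes(p):
--     if p == []:
--         yield []
--     else:
--         for x in sublistas_crecientes(p[1:]):
--             if x == sorted(x):
--                 yield x
--             if [p[0], *x] == sorted([p[0], *x]):
--                 yield [p[0], *x]
-- ===== SOURCE B (Python) =====
-- def sublistas_crecientes(p):
--     # bitmask enumeration: mask's bit i selects p[i]; ascending masks reproduce A's order
--     n = len(p)
--     for mask in range(1 << n):
--         sub = [p[i] for i in range(n) if (mask >> i) & 1]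
--         if sub == sorted(sub):
--             yield sub
-- ===== Notes on version B (the rewrite author's own statement) =====
-- stated objective: alternative
-- what changed: Replaces A's recursion on the tail (interleaving yields of x and p[0]+x) with a flat iterative enumeration of all subsets by ascending integer bitmask (bit i selects p[i]), keeping a subset iff it equals its sorted form; ascending masks reproduce A's exact yield order. B scans all 2^n masks, so it is slower than A (whose recursion prunes) on long unsorted inputs.
import Mathlib
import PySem

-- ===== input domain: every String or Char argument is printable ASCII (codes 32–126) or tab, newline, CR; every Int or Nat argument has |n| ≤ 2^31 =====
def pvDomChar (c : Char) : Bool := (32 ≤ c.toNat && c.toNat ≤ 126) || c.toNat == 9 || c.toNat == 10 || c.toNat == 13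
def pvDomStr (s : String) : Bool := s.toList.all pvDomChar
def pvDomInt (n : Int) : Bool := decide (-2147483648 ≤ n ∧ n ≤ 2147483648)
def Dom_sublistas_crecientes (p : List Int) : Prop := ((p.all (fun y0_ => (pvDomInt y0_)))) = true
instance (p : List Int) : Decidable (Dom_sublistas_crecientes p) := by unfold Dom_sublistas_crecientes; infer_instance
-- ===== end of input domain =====

-- B enumerates subsets by ascending bitmask (bit i ↦ p[i]) instead of A's recursion on the tail; same output list, same order.
-- A is a generator; both are modelled as the list of yielded values.

-- ===== PORT A =====
def sublistas_crecientes (p : List Int) : List (List Int) :=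
  match p with
  | [] => [[]]
  | a :: t =>
    (sublistas_crecientes t).flatMap (fun x =>
      (if x = PySem.List.sorted x (fun y => y) false then [x] else []) ++
      (if (a :: x) = PySem.List.sorted (a :: x) (fun y => y) false then [a :: x] else []))

-- ===== PORT B =====
-- sub = [p[i] for i in range(len(p)) if (mask >> i) & 1]
def pvSubMask (p : List Int) (mask : Nat) : List Int :=
  (List.range p.length).flatMap (fun i => if (mask >>> i) &&& 1 = 1 then [p.getD i 0] else [])

def sublistas_crecientes_alt (p : List Int) : List (List Int) :=
  (List.range (1 <<< p.length)).flatMap (fun mask =>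
    let sub := pvSubMask p mask
    if sub = PySem.List.sorted sub (fun y => y) false then [sub] else [])

-- ===== PRECONDITION & SPEC =====
def Spec_sublistas_crecientes (p : List Int) (out : List (List Int)) : Prop := out = sublistas_crecientes_alt p
instance (p : List Int) (out : List (List Int)) : Decidable (Spec_sublistas_crecientes p out) := by unfold Spec_sublistas_crecientes; infer_instance

-- ===== CLAIM (what is proved, stated in full; the proofs are below) =====
def Claim_equal_sublistas_crecientes : Prop := ∀ (p : List Int), Dom_sublistas_crecientes p → Spec_sublistas_crecientes p (sublistas_crecientes p)

-- ===== LEMMAS AND PROOFS =====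

lemma pvSorted_iff (x : List Int) :
    x = PySem.List.sorted x (fun y => y) false ↔ x.Pairwise (· ≤ ·) := by
  constructor
  · intro h
    have := PySem.List.sorted_pairwise x (fun y => y)
    rw [← h] at this
    exact this
  · intro h
    exact (PySem.List.sorted_eq_self_of_pairwise x (fun y => y) h).symm

lemma pvSubMask_cons (a : Int) (t : List Int) (m : Nat) :
    pvSubMask (a :: t) m =
      (if m &&& 1 = 1 then [a] else []) ++ pvSubMask t (m >>> 1) := by
  simp only [pvSubMask, List.length_cons, List.range_succ_eq_map, List.flatMap_cons,
    List.flatMap_map]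
  refine congrArg₂ (· ++ ·) ?_ ?_
  · simp
  · apply List.flatMap_congr
    intro i hi
    have hs : m >>> i.succ = m >>> 1 >>> i := by
      rw [Nat.succ_eq_add_one, Nat.add_comm, Nat.shiftRight_add]
    rw [hs, List.getD_cons_succ]

lemma pvSubMask_even (a : Int) (t : List Int) (m : Nat) :
    pvSubMask (a :: t) (2 * m) = pvSubMask t m := by
  rw [pvSubMask_cons]
  have h1 : (2 * m) &&& 1 = 0 := by rw [Nat.and_one_is_mod]; omega
  have h2 : (2 * m) >>> 1 = m := by rw [Nat.shiftRight_succ, Nat.shiftRight_zero]; omega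
  simp [h1, h2]

lemma pvSubMask_odd (a : Int) (t : List Int) (m : Nat) :
    pvSubMask (a :: t) (2 * m + 1) = a :: pvSubMask t m := by
  rw [pvSubMask_cons]
  have h1 : (2 * m + 1) &&& 1 = 1 := by rw [Nat.and_one_is_mod]; omega
  have h2 : (2 * m + 1) >>> 1 = m := by rw [Nat.shiftRight_succ, Nat.shiftRight_zero]; omega
  simp [h1, h2]

lemma pvFlatMap_range_two_mul (n : Nat) (f : Nat → List (List Int)) :
    (List.range (2 * n)).flatMap f =
      (List.range n).flatMap (fun k => f (2 * k) ++ f (2 * k + 1)) := by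
  induction n with
  | zero => rfl
  | succ n ih =>
    have h : 2 * (n + 1) = (2 * n + 1) + 1 := by omega
    rw [h, List.range_succ, List.range_succ, List.range_succ]
    simp [List.flatMap_append, ih]

lemma pvMain_eq (p : List Int) : sublistas_crecientes p = sublistas_crecientes_alt p := by
  induction p with
  | nil => decide
  | cons a t ih =>
    have hpow : 1 <<< (t.length + 1) = 2 * (1 <<< t.length) := by
      simp [Nat.shiftLeft_eq, pow_succ]; ring
    show (sublistas_crecientes t).flatMap _ = _
    rw [ih]
    simp only [sublistas_crecientes_alt, List.length_cons, hpow, pvFlatMap_range_two_mul,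
      List.flatMap_assoc]
    apply List.flatMap_congr
    intro k _
    rw [pvSubMask_even, pvSubMask_odd]
    by_cases hc : pvSubMask t k = PySem.List.sorted (pvSubMask t k) (fun y => y) false
    · rw [if_pos hc]
      simp only [List.flatMap_cons, List.flatMap_nil, List.append_nil]
      rw [if_pos hc]
    · have hc2 : ¬ (a :: pvSubMask t k =
          PySem.List.sorted (a :: pvSubMask t k) (fun y => y) false) := by
        intro h
        exact hc ((pvSorted_iff _).2 (((pvSorted_iff _).1 h).tail))
      rw [if_neg hc]
      simp [hc2]

-- ===== VERDICT (by name: the statement is the Claim_ definition above) =====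
theorem sublistas_crecientes_spec : Claim_equal_sublistas_crecientes := by
  intro p _
  unfold Spec_sublistas_crecientes
  exact pvMain_eq p
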